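-- pv_equiv track=rewrite | github.com/jiazhenshen128/nlptest | practical3.py | keywords2labels
-- ===== SOURCE A (Python) =====
-- def keywords2labels(ks):
--     ls = ['' for i in range(0,len(ks))]
--     counter = 0
--     for k in ks:
--         if 'technology' in k:
--             ls[counter] += 'T'
--         else:
--             ls[counter] += 'o'
--
--         if 'entertainment' in k:
--             ls[counter] += 'E'
--         else:
--             ls[counter] += 'o'
--
--         if 'design' in k:
--             ls[counter] += 'D'
--         else:
--             ls[counter] += 'o'
--
--         counter += 1
--     return ls
-- ===== SOURCE B (Python) =====
-- # All 8 possible labels precomputed; the label is picked by a 3-bit presence mask.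
-- LABELS = ('ooo', 'ooD', 'oEo', 'oED', 'Too', 'ToD', 'TEo', 'TED')
--
-- def keywords2labels(ks):
--     return [LABELS[(('technology' in k) << 2)
--                    | (('entertainment' in k) << 1)
--                    | ('design' in k)] for k in ks]
-- ===== Notes on version B (the rewrite author's own statement) =====
-- stated objective: alternative
-- what changed: Instead of building each label character by character with a counter and three if/else '+=' mutations, B precomputes all 8 possible label strings and selects one per keyword by a 3-bit presence bitmask index; no string construction happens at runtime.
import Mathlib
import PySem

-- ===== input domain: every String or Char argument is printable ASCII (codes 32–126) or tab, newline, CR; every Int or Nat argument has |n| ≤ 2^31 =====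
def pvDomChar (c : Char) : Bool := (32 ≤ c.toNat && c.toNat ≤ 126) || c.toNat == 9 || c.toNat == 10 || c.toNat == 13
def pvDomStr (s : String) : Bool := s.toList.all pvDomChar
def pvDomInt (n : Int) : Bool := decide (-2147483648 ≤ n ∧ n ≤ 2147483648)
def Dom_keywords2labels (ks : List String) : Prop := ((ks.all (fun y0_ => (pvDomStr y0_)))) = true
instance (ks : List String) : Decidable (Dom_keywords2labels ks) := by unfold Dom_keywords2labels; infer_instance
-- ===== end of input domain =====

-- B replaces A's counter loop building each label via three if/else '+=' mutations with a
-- lookup into a precomputed table of all 8 labels indexed by a 3-bit presence mask; objective: alternative.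

-- ===== PORT A =====
-- loop 'for k in ks' with the mutable list ls and counter, three sequential '+=' updates each
def keywords2labelsLoop (ks : List String) (ls : List String) (counter : Nat) : List String :=
  match ks with
  | [] => ls
  | k :: rest =>
    let ls := ls.set counter ((ls.getD counter "") ++ (if PySem.Str.isIn "technology" k then "T" else "o"))
    let ls := ls.set counter ((ls.getD counter "") ++ (if PySem.Str.isIn "entertainment" k then "E" else "o"))
    let ls := ls.set counter ((ls.getD counter "") ++ (if PySem.Str.isIn "design" k then "D" else "o"))
    keywords2labelsLoop rest ls (counter + 1)

def keywords2labels (ks : List String) : List String :=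
  keywords2labelsLoop ks (List.replicate ks.length "") 0

-- ===== PORT B =====
-- the tuple LABELS of Source B
def keywords2labelsTable : List String :=
  ["ooo", "ooD", "oEo", "oED", "Too", "ToD", "TEo", "TED"]

-- ('technology' in k) << 2 | ('entertainment' in k) << 1 | ('design' in k), then LABELS[idx]
def keywords2labels_alt (ks : List String) : List String :=
  ks.map (fun k =>
    keywords2labelsTable.getD
      ((if PySem.Str.isIn "technology" k then 4 else 0)
        + (if PySem.Str.isIn "entertainment" k then 2 else 0)
        + (if PySem.Str.isIn "design" k then 1 else 0)) "")

-- ===== PRECONDITION & SPEC =====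
def Spec_keywords2labels (ks : List String) (out : List String) : Prop := out = keywords2labels_alt ks
instance (ks : List String) (out : List String) : Decidable (Spec_keywords2labels ks out) := by unfold Spec_keywords2labels; infer_instance

-- ===== CLAIM (what is proved, stated in full; the proofs are below) =====
def Claim_equal_keywords2labels : Prop := ∀ (ks : List String), Dom_keywords2labels ks → Spec_keywords2labels ks (keywords2labels ks)

-- ===== LEMMAS AND PROOFS =====

-- B's per-keyword label, for the invariant
def keywords2labelsLabel (k : String) : String :=
  keywords2labelsTable.getD
    ((if PySem.Str.isIn "technology" k then 4 else 0)
      + (if PySem.Str.isIn "entertainment" k then 2 else 0)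
      + (if PySem.Str.isIn "design" k then 1 else 0)) ""

lemma keywords2labels_set_at (pre : List String) (x y : String) (tail : List String) :
    (pre ++ x :: tail).set pre.length y = pre ++ y :: tail := by
  induction pre with
  | nil => rfl
  | cons a pre ih => simp [ih]

lemma keywords2labels_getD_at (pre : List String) (x : String) (tail : List String) :
    (pre ++ x :: tail).getD pre.length "" = x := by
  induction pre with
  | nil => rfl
  | cons a pre ih => simp [ih]

-- A's three-append label equals B's table lookup, by the 8 cases of the mask
lemma keywords2labels_label_eq (k : String) :
    ("" ++ (if PySem.Str.isIn "technology" k then "T" else "o")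
        ++ (if PySem.Str.isIn "entertainment" k then "E" else "o"))
        ++ (if PySem.Str.isIn "design" k then "D" else "o")
      = keywords2labelsLabel k := by
  unfold keywords2labelsLabel keywords2labelsTable
  split_ifs <;> rfl

lemma keywords2labels_loop_inv (ks : List String) :
    ∀ (pre : List String),
      keywords2labelsLoop ks (pre ++ List.replicate ks.length "") pre.length
        = pre ++ ks.map keywords2labelsLabel := by
  induction ks with
  | nil => intro pre; simp [keywords2labelsLoop]
  | cons k rest ih =>
    intro pre
    have step :
        keywords2labelsLoop (k :: rest) (pre ++ List.replicate (k :: rest).length "") pre.length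
          = keywords2labelsLoop rest ((pre ++ [keywords2labelsLabel k]) ++ List.replicate rest.length "")
              (pre ++ [keywords2labelsLabel k]).length := by
      simp only [keywords2labelsLoop, List.length_cons, List.replicate_succ]
      simp only [keywords2labels_getD_at, keywords2labels_set_at]
      have hlen : (pre ++ [keywords2labelsLabel k]).length = pre.length + 1 := by simp
      rw [hlen, keywords2labels_label_eq, List.append_assoc, List.singleton_append]
    rw [step, ih (pre ++ [keywords2labelsLabel k])]
    simp

-- ===== VERDICT (by name: the statement is the Claim_ definition above) =====
theorem keywords2labels_spec : Claim_equal_keywords2labels := by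
  intro ks _
  unfold Spec_keywords2labels keywords2labels keywords2labels_alt
  simpa [keywords2labelsLabel] using keywords2labels_loop_inv ks []
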